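-- pv_equiv track=rewrite | github.com/ansible/django-ansible-base | ansible_base/rbac/caching.py | all_team_parents
-- ===== SOURCE A (Python) =====
-- from typing import Optional
--
-- def all_team_parents(team_id: int, team_team_parents: dict, seen: Optional[set] = None) -> set[int]:
--     """
--     Returns parent teams, and parent teams of parent teams, until we have them all
--         {parent_team_id, parent_team_id, ...}
--
--     team_id: id of the team we want to get the direct and indirect parents of
--     team_team_parents: mapping of team id to ids of its parents, this is not modified by this method
--     seen: mutable set that will be added to by each call so that we can not recurse infinitely
--     """
--     parent_team_ids = set()
--     if seen is None:
--         seen = set()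
--     for parent_id in team_team_parents.get(team_id, []):
--         if parent_id in seen:
--             # will be combined in a lower level of the call stack
--             # this condition prevents infinite recursion in the event of loops in the graph
--             continue
--         parent_team_ids.add(parent_id)
--         seen.add(parent_id)
--         parent_team_ids.update(all_team_parents(parent_id, team_team_parents, seen=seen))
--     return parent_team_ids
-- ===== SOURCE B (Python) =====
-- def all_team_parents(team_id, team_team_parents, seen=None):
--     """Iterative DFS with an explicit stack instead of recursion; returns the
--     set of newly discovered (not pre-seen) transitive parents of team_id."""
--     if seen is None:
--         seen = set()
--     result = set()
--     stack = list(reversed(team_team_parents.get(team_id, [])))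
--     while stack:
--         p = stack.pop()
--         if p in seen:
--             continue
--         seen.add(p)
--         result.add(p)
--         stack.extend(reversed(team_team_parents.get(p, [])))
--     return result
-- ===== Notes on version B (the rewrite author's own statement) =====
-- stated objective: simpler
-- what changed: Replaces the recursive DFS (per-level result sets unioned up the call stack) by a single iterative loop over an explicit stack that accumulates one result set.
import Mathlib
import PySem

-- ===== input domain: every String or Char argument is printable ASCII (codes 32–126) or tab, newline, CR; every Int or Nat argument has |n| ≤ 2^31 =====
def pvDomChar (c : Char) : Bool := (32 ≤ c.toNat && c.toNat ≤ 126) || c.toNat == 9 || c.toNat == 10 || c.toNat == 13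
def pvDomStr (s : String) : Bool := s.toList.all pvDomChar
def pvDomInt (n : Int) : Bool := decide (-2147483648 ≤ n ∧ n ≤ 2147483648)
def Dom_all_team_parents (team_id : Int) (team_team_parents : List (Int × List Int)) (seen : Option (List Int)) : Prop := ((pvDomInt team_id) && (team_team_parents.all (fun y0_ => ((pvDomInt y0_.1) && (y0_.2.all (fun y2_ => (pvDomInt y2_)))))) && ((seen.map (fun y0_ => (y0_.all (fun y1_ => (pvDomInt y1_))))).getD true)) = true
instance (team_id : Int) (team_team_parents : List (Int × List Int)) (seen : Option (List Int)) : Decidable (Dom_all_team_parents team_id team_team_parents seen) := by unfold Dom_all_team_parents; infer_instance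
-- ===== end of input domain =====

-- B replaces A's recursive DFS by an iterative explicit-stack loop; equivalence is about the
-- RETURN value only (both add the same elements to a caller-supplied `seen`, which A mutates in place).

-- helpers shared by both ports: dict lookup `team_team_parents.get(k, [])`
def pvGetParents (ttp : List (Int × List Int)) (k : Int) : List Int :=
  (PySem.Dict.mk ttp).getD k []

-- termination measure: number of universe elements not yet seen
def pvUniv (ttp : List (Int × List Int)) : List Int :=
  ttp.flatMap (fun kv => kv.1 :: kv.2)

def pvCnt (ttp : List (Int × List Int)) (seen : List Int) : Nat :=
  ((pvUniv ttp).toFinset.filter (fun x => x ∉ seen)).card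

theorem pvGetParents_of_not_mem {ttp : List (Int × List Int)} {p : Int}
    (h : p ∉ pvUniv ttp) : pvGetParents ttp p = [] := by
  have hk : p ∉ (PySem.Dict.mk ttp).keys := by
    rw [PySem.Dict.keys_mk]
    intro hm
    rcases List.mem_map.mp hm with ⟨kv, hkv, hfst⟩
    exact h (by simp [pvUniv, List.mem_flatMap]; exact ⟨kv.1, kv.2, hkv, Or.inl hfst.symm⟩)
  have : (PySem.Dict.mk ttp).get? p = none := (PySem.Dict.get?_eq_none_iff_not_mem_keys _ _).mpr hk
  simp [pvGetParents, PySem.Dict.getD, this]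

theorem pvCnt_le {ttp : List (Int × List Int)} {s t : List Int}
    (h : ∀ x, x ∈ s → x ∈ t) : pvCnt ttp t ≤ pvCnt ttp s := by
  apply Finset.card_le_card
  intro x hx
  simp only [Finset.mem_filter] at hx ⊢
  exact ⟨hx.1, fun hxs => hx.2 (h x hxs)⟩

theorem pvCnt_lt {ttp : List (Int × List Int)} {s t : List Int}
    (h : ∀ x, x ∈ s → x ∈ t) {p : Int} (hU : p ∈ pvUniv ttp)
    (hps : p ∉ s) (hpt : p ∈ t) : pvCnt ttp t < pvCnt ttp s := by
  apply Finset.card_lt_card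
  constructor
  · intro x hx
    simp only [Finset.mem_filter] at hx ⊢
    exact ⟨hx.1, fun hxs => hx.2 (h x hxs)⟩
  · intro hsub
    have := hsub (Finset.mem_filter.mpr ⟨List.mem_toFinset.mpr hU, hps⟩)
    exact (Finset.mem_filter.mp this).2 hpt

theorem pvCnt_add_of_not_univ {ttp : List (Int × List Int)} {s : List Int} {p : Int}
    (h : p ∉ pvUniv ttp) : pvCnt ttp (PySem.Set.add s p) = pvCnt ttp s := by
  unfold pvCnt
  congr 1
  apply Finset.filter_congr
  intro x hx
  have hxp : x ≠ p := fun he => h (he ▸ List.mem_toFinset.mp hx)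
  simp [PySem.Set.mem_add, hxp]

-- ===== PORT A =====
-- the recursive function, with the mutable `seen` threaded through; the second component
-- carries (only) the proof `seen` grows, needed for termination
def atpLoopA (ttp : List (Int × List Int)) (ps : List Int) (seen acc : PySem.Set Int) :
    PySem.Set Int × {s : PySem.Set Int // ∀ x, x ∈ seen → x ∈ s} :=
  match ps with
  | [] => (acc, ⟨seen, fun _ h => h⟩)
  | p :: rest =>
    if hp : PySem.Set.contains seen p then
      atpLoopA ttp rest seen acc
    else
      let acc1 := PySem.Set.add acc p
      let seen1 := PySem.Set.add seen p
      let r1 := atpLoopA ttp (pvGetParents ttp p) seen1 PySem.Set.empty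
      let r2 := atpLoopA ttp rest r1.2.val (PySem.Set.update acc1 r1.1)
      (r2.1, ⟨r2.2.val, fun x hx =>
        r2.2.property x (r1.2.property x ((PySem.Set.mem_add _ _ _).mpr (Or.inl hx)))⟩)
termination_by (pvCnt ttp seen, ps.length)
decreasing_by
  · exact Prod.Lex.right _ (by simp)
  · have hp' : p ∉ seen := fun h => hp ((PySem.Set.contains_iff _ _).mpr h)
    by_cases hU : p ∈ pvUniv ttp
    · exact Prod.Lex.left _ _ (pvCnt_lt (fun y hy => (PySem.Set.mem_add _ _ _).mpr (Or.inl hy))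
        hU hp' ((PySem.Set.mem_add _ _ _).mpr (Or.inr rfl)))
    · rw [pvCnt_add_of_not_univ hU, pvGetParents_of_not_mem hU]
      exact Prod.Lex.right _ (by simp)
  · have hp' : p ∉ seen := fun h => hp ((PySem.Set.contains_iff _ _).mpr h)
    have hmono : ∀ y, y ∈ seen → y ∈ r1.2.val :=
      fun y hy => r1.2.property y ((PySem.Set.mem_add _ _ _).mpr (Or.inl hy))
    by_cases hU : p ∈ pvUniv ttp
    · exact Prod.Lex.left _ _ (pvCnt_lt hmono hU hp'
        (r1.2.property p ((PySem.Set.mem_add _ _ _).mpr (Or.inr rfl))))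
    · rcases lt_or_eq_of_le (pvCnt_le hmono) with h|h
      · exact Prod.Lex.left _ _ h
      · rw [h]; exact Prod.Lex.right _ (by simp)

def all_team_parents (team_id : Int) (team_team_parents : List (Int × List Int)) (seen : Option (List Int)) : List Int :=
  (atpLoopA team_team_parents (pvGetParents team_team_parents team_id)
    (match seen with | none => PySem.Set.empty | some s => PySem.Set.ofList s)
    PySem.Set.empty).1

-- ===== PORT B =====
def atpLoopB (ttp : List (Int × List Int)) (work : List Int) (seen acc : PySem.Set Int) :
    PySem.Set Int × PySem.Set Int :=
  match work with
  | [] => (acc, seen)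
  | p :: rest =>
    if hp : PySem.Set.contains seen p then
      atpLoopB ttp rest seen acc
    else
      -- pushing reversed(parents) onto a top-at-the-end Python stack = prepending parents here
      atpLoopB ttp (pvGetParents ttp p ++ rest) (PySem.Set.add seen p) (PySem.Set.add acc p)
termination_by (pvCnt ttp seen, work.length)
decreasing_by
  · exact Prod.Lex.right _ (by simp)
  · have hp' : p ∉ seen := fun h => hp ((PySem.Set.contains_iff _ _).mpr h)
    by_cases hU : p ∈ pvUniv ttp
    · exact Prod.Lex.left _ _ (pvCnt_lt (fun y hy => (PySem.Set.mem_add _ _ _).mpr (Or.inl hy))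
        hU hp' ((PySem.Set.mem_add _ _ _).mpr (Or.inr rfl)))
    · rw [pvCnt_add_of_not_univ hU, pvGetParents_of_not_mem hU]
      exact Prod.Lex.right _ (by simp)

def all_team_parents_alt (team_id : Int) (team_team_parents : List (Int × List Int)) (seen : Option (List Int)) : List Int :=
  (atpLoopB team_team_parents (pvGetParents team_team_parents team_id)
    (match seen with | none => PySem.Set.empty | some s => PySem.Set.ofList s)
    PySem.Set.empty).1

-- ===== PRECONDITION & SPEC =====
def Spec_all_team_parents (team_id : Int) (team_team_parents : List (Int × List Int)) (seen : Option (List Int)) (out : List Int) : Prop := out = all_team_parents_alt team_id team_team_parents seen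
instance (team_id : Int) (team_team_parents : List (Int × List Int)) (seen : Option (List Int)) (out : List Int) : Decidable (Spec_all_team_parents team_id team_team_parents seen out) := by unfold Spec_all_team_parents; infer_instance

-- ===== CLAIM (what is proved, stated in full; the proofs are below) =====
def Claim_equal_all_team_parents : Prop := ∀ (team_id : Int) (team_team_parents : List (Int × List Int)) (seen : Option (List Int)), Dom_all_team_parents team_id team_team_parents seen → Spec_all_team_parents team_id team_team_parents seen (all_team_parents team_id team_team_parents seen)

-- ===== LEMMAS AND PROOFS =====
theorem pvUpdate_add {a b : PySem.Set Int} {p : Int} :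
    PySem.Set.update a (PySem.Set.add b p) = PySem.Set.add (PySem.Set.update a b) p := by
  by_cases hp : p ∈ b
  · rw [PySem.Set.add_of_mem hp,
      PySem.Set.add_of_mem ((PySem.Set.mem_update _ _ _).mpr (Or.inr hp))]
  · rw [PySem.Set.add_of_not_mem hp, PySem.Set.update_append, PySem.Set.update_cons,
      PySem.Set.update_nil]

theorem atpLoopB_nil (ttp : List (Int × List Int)) (seen acc : PySem.Set Int) :
    atpLoopB ttp [] seen acc = (acc, seen) := by
  rw [atpLoopB.eq_def]

theorem atpLoopB_cons_mem (ttp : List (Int × List Int)) (seen acc : PySem.Set Int) (p : Int)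
    (rest : List Int) (hp : PySem.Set.contains seen p = true) :
    atpLoopB ttp (p :: rest) seen acc = atpLoopB ttp rest seen acc := by
  have hm : p ∈ seen := (PySem.Set.contains_iff _ _).mp hp
  rw [atpLoopB.eq_def]; simp [hm]

theorem atpLoopB_cons_not_mem (ttp : List (Int × List Int)) (seen acc : PySem.Set Int) (p : Int)
    (rest : List Int) (hp : ¬ PySem.Set.contains seen p = true) :
    atpLoopB ttp (p :: rest) seen acc =
      atpLoopB ttp (pvGetParents ttp p ++ rest) (PySem.Set.add seen p) (PySem.Set.add acc p) := by
  have hm : p ∉ seen := fun h => hp ((PySem.Set.contains_iff _ _).mpr h)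
  rw [atpLoopB.eq_def]; simp [hm]

theorem atpLoopB_update (ttp : List (Int × List Int)) (xs : List Int) (seen b : PySem.Set Int) :
    ∀ a : PySem.Set Int, atpLoopB ttp xs seen (PySem.Set.update a b) =
      (PySem.Set.update a (atpLoopB ttp xs seen b).1, (atpLoopB ttp xs seen b).2) := by
  induction xs, seen, b using atpLoopB.induct ttp with
  | case1 seen b => intro a; simp [atpLoopB_nil]
  | case2 seen b p rest hp ih =>
    intro a; rw [atpLoopB_cons_mem _ _ _ _ _ hp, atpLoopB_cons_mem _ _ _ _ _ hp]; exact ih a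
  | case3 seen b p rest hp ih =>
    intro a
    rw [atpLoopB_cons_not_mem _ _ _ _ _ hp, atpLoopB_cons_not_mem _ _ _ _ _ hp,
      show (PySem.Set.update a b).add p = PySem.Set.update a (b.add p) from pvUpdate_add.symm]
    exact ih a

theorem atpLoopB_append (ttp : List (Int × List Int)) (xs : List Int) (seen acc : PySem.Set Int) :
    ∀ ys : List Int, atpLoopB ttp (xs ++ ys) seen acc =
      atpLoopB ttp ys (atpLoopB ttp xs seen acc).2 (atpLoopB ttp xs seen acc).1 := by
  induction xs, seen, acc using atpLoopB.induct ttp with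
  | case1 seen acc => intro ys; simp [atpLoopB_nil]
  | case2 seen acc p rest hp ih =>
    intro ys
    rw [List.cons_append, atpLoopB_cons_mem _ _ _ _ _ hp, atpLoopB_cons_mem _ _ _ _ _ hp]
    exact ih ys
  | case3 seen acc p rest hp ih =>
    intro ys
    rw [List.cons_append, atpLoopB_cons_not_mem _ _ _ _ _ hp, atpLoopB_cons_not_mem _ _ _ _ _ hp,
      ← List.append_assoc]
    exact ih ys

theorem atpLoopA_eq (ttp : List (Int × List Int)) (ps : List Int) (seen acc : PySem.Set Int) :
    (atpLoopA ttp ps seen acc).1 = (atpLoopB ttp ps seen acc).1 ∧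
      (atpLoopA ttp ps seen acc).2.val = (atpLoopB ttp ps seen acc).2 := by
  induction ps, seen, acc using atpLoopA.induct ttp with
  | case1 seen acc => rw [atpLoopA.eq_def, atpLoopB_nil]; exact ⟨rfl, rfl⟩
  | case2 seen acc p rest hp ih =>
    have hm : p ∈ seen := (PySem.Set.contains_iff _ _).mp hp
    rw [atpLoopA.eq_def, atpLoopB_cons_mem _ _ _ _ _ hp]; simpa [hm] using ih
  | case3 seen acc p rest hp acc1 seen1 r1 ih1 ih1' ih2 ih2' =>
    -- unfold one step of A
    rw [atpLoopA.eq_def]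
    dsimp only
    rw [dif_neg hp]
    -- unfold B: one step, split the worklist, pull the accumulator out
    have hstep := atpLoopB_cons_not_mem ttp seen acc p rest hp
    have happ := atpLoopB_append ttp (pvGetParents ttp p) (PySem.Set.add seen p)
      (PySem.Set.add acc p) rest
    have hupd := atpLoopB_update ttp (pvGetParents ttp p) (PySem.Set.add seen p)
      PySem.Set.empty (PySem.Set.add acc p)
    simp only [show (PySem.Set.empty : PySem.Set Int) = [] from rfl, PySem.Set.update_nil] at hupd
    rw [hstep, happ, hupd]
    rw [ih1'.1, ih1'.2] at ih2'
    dsimp only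
    rw [ih1'.1, ih1'.2]
    exact ih2' 

-- ===== VERDICT (by name: the statement is the Claim_ definition above) =====
theorem all_team_parents_spec : Claim_equal_all_team_parents := by
  intro team_id ttp seen _
  unfold Spec_all_team_parents all_team_parents all_team_parents_alt
  exact (atpLoopA_eq ttp (pvGetParents ttp team_id) _ PySem.Set.empty).1
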